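-- pv_equiv track=rewrite | github.com/jmcbroome/circleseq | make_brpileup.py | best_base
-- ===== SOURCE A (Python) =====
-- def best_base(basecounts):
--     #if all are 0, return an N.
--     if all([c==0 for c in basecounts.values()]):
--         return ('N',0)
--     #nonz = [(b,c) for b,c in basecounts.items() if c > 0]
--     nonz = sorted([(b,c) for b,c in basecounts.items() if c > 0],key = lambda x:x[1], reverse = True)
--     if len(nonz) == 1:
--         return nonz[0]
--     elif len(nonz) > 1:
--         return ('N', nonz[0][1]) #retain depth but don't count as a real change if there's any controversy.
--     else:
--         return ('N',0)
-- ===== SOURCE B (Python) =====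
-- def best_base(basecounts):
--     # Single pass: count positive entries and track the first pair with the maximal count.
--     nonzero = 0
--     best = None
--     for b, c in basecounts.items():
--         if c > 0:
--             nonzero += 1
--             if best is None or c > best[1]:
--                 best = (b, c)
--     if nonzero == 0:
--         return ('N', 0)
--     if nonzero == 1:
--         return best
--     return ('N', best[1])
-- ===== Notes on version B (the rewrite author's own statement) =====
-- stated objective: simpler
-- what changed: Replaced the list-comprehension-plus-sort (and the separate all-zero scan) by one linear pass that counts positive entries and tracks the running maximum pair.
import Mathlib
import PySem

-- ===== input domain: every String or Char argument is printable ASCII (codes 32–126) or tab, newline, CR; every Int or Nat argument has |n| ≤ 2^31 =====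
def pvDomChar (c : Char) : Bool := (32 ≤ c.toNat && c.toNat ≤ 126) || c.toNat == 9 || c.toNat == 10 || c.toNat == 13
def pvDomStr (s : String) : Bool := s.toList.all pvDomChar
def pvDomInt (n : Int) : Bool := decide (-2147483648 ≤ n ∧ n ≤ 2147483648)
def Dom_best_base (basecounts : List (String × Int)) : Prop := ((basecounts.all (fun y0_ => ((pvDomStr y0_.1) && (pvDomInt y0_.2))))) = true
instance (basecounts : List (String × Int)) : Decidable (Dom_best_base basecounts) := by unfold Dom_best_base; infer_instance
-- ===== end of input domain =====

-- B replaces A's filter-then-sort (and separate all-zero scan) by one pass that counts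
-- positive entries and tracks the first maximal pair (objective: simpler).

-- ===== PORT A =====
def best_base (basecounts : List (String × Int)) : String × Int :=
  -- if all([c==0 for c in basecounts.values()]): return ('N',0)
  if (basecounts.map (·.2)).all (fun c => c == 0) then ("N", 0)
  else
    -- nonz = sorted([(b,c) for b,c in basecounts.items() if c > 0], key=lambda x: x[1], reverse=True)
    let nonz := PySem.List.sorted (basecounts.filter (fun p => decide (0 < p.2))) (fun p => p.2) true
    match nonz with
    | [] => ("N", 0)          -- else branch (len == 0)
    | [p] => p                -- len(nonz) == 1
    | p :: _ :: _ => ("N", p.2)  -- len(nonz) > 1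

-- ===== PORT B =====
-- the for-loop of Source B: carries (nonzero, best)
def bbLoop : List (String × Int) → Int → Option (String × Int) → Int × Option (String × Int)
  | [], n, best => (n, best)
  | (b, c) :: rest, n, best =>
    if 0 < c then
      bbLoop rest (n + 1)
        (match best with
         | none => some (b, c)
         | some q => if q.2 < c then some (b, c) else some q)
    else
      bbLoop rest n best

def best_base_alt (basecounts : List (String × Int)) : String × Int :=
  let r := bbLoop basecounts 0 none
  if r.1 = 0 then ("N", 0)
  else if r.1 = 1 then r.2.getD ("N", 0)
  else ("N", (r.2.getD ("N", 0)).2)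

-- ===== PRECONDITION & SPEC =====
def Spec_best_base (basecounts : List (String × Int)) (out : String × Int) : Prop := out = best_base_alt basecounts
instance (basecounts : List (String × Int)) (out : String × Int) : Decidable (Spec_best_base basecounts out) := by unfold Spec_best_base; infer_instance

-- ===== CLAIM (what is proved, stated in full; the proofs are below) =====
def Claim_equal_best_base : Prop := ∀ (basecounts : List (String × Int)), Dom_best_base basecounts → Spec_best_base basecounts (best_base basecounts)

-- ===== LEMMAS AND PROOFS =====

-- the loop's state update on one positive element
def bbUpd (best : Option (String × Int)) (p : String × Int) : Option (String × Int) :=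
  match best with
  | none => some p
  | some q => if q.2 < p.2 then some p else some q

-- the loop is a fold of bbUpd over the positive entries, and counts them
theorem bbLoop_eq (l : List (String × Int)) : ∀ (n : Int) (best : Option (String × Int)),
    bbLoop l n best =
      (n + (l.filter (fun p => decide (0 < p.2))).length, (l.filter (fun p => decide (0 < p.2))).foldl bbUpd best) := by
  induction l with
  | nil => intro n best; simp [bbLoop]
  | cons hd tl ih =>
    intro n best
    obtain ⟨b, c⟩ := hd
    by_cases hc : 0 < c
    · simp [bbLoop, hc, ih, bbUpd]
      ring
    · simp [bbLoop, hc, ih]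

-- folding bbUpd over a nonempty list from none yields a member whose count dominates all
theorem bbFold_some (l : List (String × Int)) : ∀ (q : String × Int),
    ∃ m, l.foldl bbUpd (some q) = some m ∧ (m = q ∨ m ∈ l) ∧ q.2 ≤ m.2 ∧ ∀ y ∈ l, y.2 ≤ m.2 := by
  induction l with
  | nil => intro q; exact ⟨q, rfl, Or.inl rfl, le_refl _, by simp⟩
  | cons hd tl ih =>
    intro q
    by_cases h : q.2 < hd.2
    · obtain ⟨m, hm, hmem, hle, hall⟩ := ih hd
      refine ⟨m, by simpa [bbUpd, h] using hm, ?_, ?_, ?_⟩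
      · rcases hmem with h1 | h1
        · exact Or.inr (by simp [h1])
        · exact Or.inr (by simp [h1])
      · exact le_of_lt (lt_of_lt_of_le h hle)
      · intro y hy
        rcases List.mem_cons.mp hy with h1 | h1
        · simpa [h1] using hle
        · exact hall y h1
    · obtain ⟨m, hm, hmem, hle, hall⟩ := ih q
      refine ⟨m, by simpa [bbUpd, h] using hm, ?_, hle, ?_⟩
      · rcases hmem with h1 | h1
        · exact Or.inl h1
        · exact Or.inr (by simp [h1])
      · intro y hy
        rcases List.mem_cons.mp hy with h1 | h1
        · exact h1 ▸ le_trans (not_lt.mp h) hle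
        · exact hall y h1
theorem bbFold_none (l : List (String × Int)) (hne : l ≠ []) :
    ∃ m, l.foldl bbUpd none = some m ∧ m ∈ l ∧ ∀ y ∈ l, y.2 ≤ m.2 := by
  match l with
  | [] => exact absurd rfl hne
  | hd :: tl =>
    obtain ⟨m, hm, hmem, hle, hall⟩ := bbFold_some tl hd
    refine ⟨m, by simpa [bbUpd] using hm, ?_, ?_⟩
    · rcases hmem with h1 | h1
      · simp [h1]
      · simp [h1]
    · intro y hy
      rcases List.mem_cons.mp hy with h1 | h1
      · exact h1 ▸ hle
      · exact hall y h1

-- ===== VERDICT (by name: the statement is the Claim_ definition above) =====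
theorem best_base_spec : Claim_equal_best_base := by
  intro bc _
  unfold Spec_best_base best_base best_base_alt
  rw [bbLoop_eq]
  generalize hnz : bc.filter (fun p => decide (0 < p.2)) = nonz
  match nonz with
  | [] =>
    have hs : PySem.List.sorted ([] : List (String × Int)) (fun p => p.2) true = [] := rfl
    simp [hs]
  | [p] =>
    have hp : p ∈ bc.filter (fun p => decide (0 < p.2)) := by rw [hnz]; simp
    have hpos : 0 < p.2 := by
      have := List.of_mem_filter hp
      simpa using this
    have hpbc : p ∈ bc := List.mem_of_mem_filter hp
    have hallfalse : ((bc.map (·.2)).all (fun c => c == 0)) = false := by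
      simp only [List.all_eq_false]
      exact ⟨p.2, List.mem_map.mpr ⟨p, hpbc, rfl⟩, by simp; omega⟩
    have hs : PySem.List.sorted [p] (fun q => q.2) true = [p] := rfl
    simp [hallfalse, hs, List.foldl, bbUpd]
  | p :: q :: rest =>
    -- nonz has ≥ 2 elements
    have hne : (p :: q :: rest) ≠ ([] : List (String × Int)) := by simp
    obtain ⟨m, hm, hmmem, hmall⟩ := bbFold_none (p :: q :: rest) hne
    have hpf : p ∈ bc.filter (fun p => decide (0 < p.2)) := by rw [hnz]; simp
    have hpbc : p ∈ bc := List.mem_of_mem_filter hpf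
    have hppos : 0 < p.2 := by
      have := List.of_mem_filter hpf
      simpa using this
    have hallfalse : ((bc.map (·.2)).all (fun c => c == 0)) = false := by
      simp only [List.all_eq_false]
      exact ⟨p.2, List.mem_map.mpr ⟨p, hpbc, rfl⟩, by simp; omega⟩
    -- sorted head
    have hslen : (PySem.List.sorted (p :: q :: rest) (fun q => q.2) true).length = rest.length + 2 := by
      rw [PySem.List.length_sorted]; simp
    match hs : PySem.List.sorted (p :: q :: rest) (fun q => q.2) true with
    | [] => rw [hs] at hslen; simp at hslen
    | [x] => rw [hs] at hslen; simp at hslen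
    | x :: y :: t =>
      have hxmax : ∀ z ∈ (p :: q :: rest), z.2 ≤ x.2 := by
        intro z hz
        exact PySem.List.key_head_sorted_rev_ge _ (fun q => q.2) hs z hz
      have hxmem : x ∈ (p :: q :: rest) := by
        have : x ∈ PySem.List.sorted (p :: q :: rest) (fun q => q.2) true := by rw [hs]; simp
        exact (PySem.List.mem_sorted _ _ _ _).mp this
      have hxm : x.2 = m.2 := le_antisymm (hmall x hxmem) (hxmax m hmmem)
      simp only [hallfalse, Bool.false_eq_true, if_false, hm]
      have h1 : ¬ ((rest.length : Int) + 1 + 1 = 0) := by omega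
      have h2 : ¬ ((rest.length : Int) + 1 = 0) := by omega
      simp [h1, h2, hxm]
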